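-- pv_equiv track=rewrite | github.com/nicknagi/SAWCAP-Scalability | infrastructure/utils.py | _remove_lines_between_two_keywords
-- ===== SOURCE A (Python) =====
-- def _remove_lines_between_two_keywords(keyword1, keyword2, contents):
--     write = True
--     new_contents = []
--     for line in contents:
--         if keyword1 in line:
--             write = False
--         if write:
--             new_contents.append(line)
--
--     return new_contents
-- ===== SOURCE B (Python) =====
-- def _remove_lines_between_two_keywords(keyword1, keyword2, contents):
--     # Right-to-left fold: walk the lines backwards; a line containing keyword1
--     # discards everything collected so far, any other line is kept; reverse at
--     # the end.  keyword2 is unused, exactly as in A.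
--     out = []
--     for line in reversed(contents):
--         if keyword1 in line:
--             out.clear()
--         else:
--             out.append(line)
--     out.reverse()
--     return out
-- ===== Notes on version B (the rewrite author's own statement) =====
-- stated objective: alternative
-- what changed: Replaces the forward write-flag append loop by a right-to-left fold: walking the lines backwards, a keyword1 line resets the accumulator and other lines are appended, with one final reverse; no flag and opposite traversal order.
import Mathlib
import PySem

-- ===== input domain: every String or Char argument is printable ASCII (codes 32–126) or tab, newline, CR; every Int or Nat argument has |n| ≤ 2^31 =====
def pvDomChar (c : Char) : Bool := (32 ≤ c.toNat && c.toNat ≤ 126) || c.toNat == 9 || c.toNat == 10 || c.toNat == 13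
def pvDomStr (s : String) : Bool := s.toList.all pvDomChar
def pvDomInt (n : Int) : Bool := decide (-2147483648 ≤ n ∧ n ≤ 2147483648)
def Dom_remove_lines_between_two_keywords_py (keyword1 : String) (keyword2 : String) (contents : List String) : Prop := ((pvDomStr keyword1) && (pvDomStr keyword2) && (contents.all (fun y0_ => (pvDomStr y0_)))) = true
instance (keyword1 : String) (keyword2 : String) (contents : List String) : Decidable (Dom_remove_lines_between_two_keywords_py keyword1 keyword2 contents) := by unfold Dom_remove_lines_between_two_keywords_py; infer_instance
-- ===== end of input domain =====

-- B replaces A's forward write-flag loop by a right-to-left fold (reset on keyword, final reverse); objective: alternative.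


-- ===== PORT A =====
-- the for-loop with its `write` flag and accumulating `new_contents`
def pvALoop (keyword1 : String) (write : Bool) (new_contents : List String) : List String → List String
  | [] => new_contents
  | line :: rest =>
    let write' := if PySem.Str.isIn keyword1 line then false else write
    let new_contents' := if write' then new_contents ++ [line] else new_contents
    pvALoop keyword1 write' new_contents' rest

def remove_lines_between_two_keywords_py (keyword1 : String) (keyword2 : String) (contents : List String) : List String :=
  pvALoop keyword1 true [] contents

-- ===== PORT B =====
-- backwards loop: a keyword1 line clears the accumulator, others are appended; final reverse
def remove_lines_between_two_keywords_py_alt (keyword1 : String) (keyword2 : String) (contents : List String) : List String :=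
  (contents.reverse.foldl
    (fun out line => if PySem.Str.isIn keyword1 line then [] else out ++ [line]) []).reverse

-- ===== PRECONDITION & SPEC =====
def Spec_remove_lines_between_two_keywords_py (keyword1 : String) (keyword2 : String) (contents : List String) (out : List String) : Prop := out = remove_lines_between_two_keywords_py_alt keyword1 keyword2 contents
instance (keyword1 : String) (keyword2 : String) (contents : List String) (out : List String) : Decidable (Spec_remove_lines_between_two_keywords_py keyword1 keyword2 contents out) := by unfold Spec_remove_lines_between_two_keywords_py; infer_instance

-- ===== CLAIM (what is proved, stated in full; the proofs are below) =====
def Claim_equal_remove_lines_between_two_keywords_py : Prop := ∀ (keyword1 : String) (keyword2 : String) (contents : List String), Dom_remove_lines_between_two_keywords_py keyword1 keyword2 contents → Spec_remove_lines_between_two_keywords_py keyword1 keyword2 contents (remove_lines_between_two_keywords_py keyword1 keyword2 contents)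

-- ===== LEMMAS AND PROOFS =====
-- Both sides equal the prefix of lines before the first line containing keyword1.

theorem pvALoop_false (k : String) (acc : List String) (xs : List String) :
    pvALoop k false acc xs = acc := by
  induction xs generalizing acc with
  | nil => rfl
  | cons l rest ih => simp [pvALoop, ih]

theorem pvALoop_true (k : String) (acc : List String) (xs : List String) :
    pvALoop k true acc xs = acc ++ xs.takeWhile (fun l => ! PySem.Str.isIn k l) := by
  induction xs generalizing acc with
  | nil => simp [pvALoop]
  | cons l rest ih =>
    simp only [pvALoop, List.takeWhile_cons, PySem.Str.isIn]
    by_cases h : PySem.Chars.isIn k.toList l.toList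
    · simp [h, pvALoop_false]
    · simp [h, ih, PySem.Str.isIn]

theorem pvBLoop_takeWhile (k : String) (xs : List String) :
    (xs.foldr (fun line out => if PySem.Str.isIn k line then [] else out ++ [line]) []).reverse
      = xs.takeWhile (fun l => ! PySem.Str.isIn k l) := by
  induction xs with
  | nil => simp
  | cons l rest ih =>
    simp only [List.foldr_cons, List.takeWhile_cons, PySem.Str.isIn]
    by_cases h : PySem.Chars.isIn k.toList l.toList
    · simp [h]
    · simp only [PySem.Str.isIn] at ih
      simp [h, ih]

-- ===== VERDICT (by name: the statement is the Claim_ definition above) =====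
theorem remove_lines_between_two_keywords_py_spec : Claim_equal_remove_lines_between_two_keywords_py := by
  intro k1 k2 contents _
  unfold Spec_remove_lines_between_two_keywords_py remove_lines_between_two_keywords_py remove_lines_between_two_keywords_py_alt
  rw [List.foldl_reverse, pvALoop_true, pvBLoop_takeWhile]
  simp
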